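-- pv_equiv track=rewrite | github.com/HSchwarz99/math | coma_aufgaben/challenge_8.py | christmasFated
-- ===== SOURCE A (Python) =====
-- def christmasFated(positions):
--   a = True
--   b = True
--   c1 = 0
--   c2 = 0
--   for x in positions:
--     if x[0] == 'Z':
--       a = False
--       c1 += 1
--     elif x[0] == 'H' or x[0] == 'HH':
--       b = False
--       c2 += 1
--   return a or b
-- ===== SOURCE B (Python) =====
-- def christmasFated(positions):
--     return (all(not x.startswith('Z') for x in positions)
--             or all(not x.startswith('H') for x in positions))
-- ===== Notes on version B (the rewrite author's own statement) =====
-- stated objective: simpler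
-- what changed: Replaces the single loop maintaining two boolean flags and two unused counters with two independent short-circuiting all() scans (no 'Z'-starting element, or no 'H'-starting element); the dead x[0]=='HH' comparison (a 1-char string can never equal 'HH') is dropped.
import Mathlib
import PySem

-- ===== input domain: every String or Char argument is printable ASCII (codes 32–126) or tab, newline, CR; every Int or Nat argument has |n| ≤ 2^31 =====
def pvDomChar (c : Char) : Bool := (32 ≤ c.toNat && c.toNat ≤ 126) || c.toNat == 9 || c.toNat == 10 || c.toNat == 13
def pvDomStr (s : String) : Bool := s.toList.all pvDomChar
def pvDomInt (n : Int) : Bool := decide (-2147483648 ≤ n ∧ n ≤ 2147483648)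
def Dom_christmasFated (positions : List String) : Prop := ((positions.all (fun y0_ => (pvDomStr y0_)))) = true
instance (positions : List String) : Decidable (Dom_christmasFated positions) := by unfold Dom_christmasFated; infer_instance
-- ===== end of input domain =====

-- B replaces the flag-and-counter loop with two independent short-circuiting all-scans; simpler.
-- ===== PORT A =====
def christmasFated (positions : List String) : Bool :=
  let st := positions.foldl (fun (st : Bool × Bool × Int × Int) x =>
      if PySem.Str.pyGet? x 0 = some 'Z' then (false, st.2.1, st.2.2.1 + 1, st.2.2.2)
      -- Python's `x[0] == 'HH'` compares the 1-char string x[0] with 'HH': always False; kept literally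
      else if PySem.Str.pyGet? x 0 = some 'H' ∨ False then (st.1, false, st.2.2.1, st.2.2.2 + 1)
      else st)
    (true, true, (0 : Int), (0 : Int))
  st.1 || st.2.1

-- ===== PORT B =====
def christmasFated_alt (positions : List String) : Bool :=
  (positions.all (fun x => !(PySem.Str.startswith x "Z")))
    || (positions.all (fun x => !(PySem.Str.startswith x "H")))

-- ===== PRECONDITION & SPEC =====
-- Pre_ excludes lists containing an empty string, on which A's x[0] raises IndexError.
def Pre_christmasFated (positions : List String) : Prop := ∀ x ∈ positions, x ≠ ""
instance (positions : List String) : Decidable (Pre_christmasFated positions) := by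
  unfold Pre_christmasFated; infer_instance
def pvWitness_christmasFated : List String := ["Z", "H", "xy"]
def Spec_christmasFated (positions : List String) (out : Bool) : Prop := out = christmasFated_alt positions
instance (positions : List String) (out : Bool) : Decidable (Spec_christmasFated positions out) := by unfold Spec_christmasFated; infer_instance

-- ===== CLAIM (what is proved, stated in full; the proofs are below) =====
def Claim_equal_christmasFated : Prop := ∀ (positions : List String), Dom_christmasFated positions → Pre_christmasFated positions → Spec_christmasFated positions (christmasFated positions)

-- ===== LEMMAS AND PROOFS =====

-- for a non-empty string, starting with a 1-char prefix p = [c] means the first char is c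
theorem startswith_single_iff (x : String) (c : Char) (p : String) (hp : p.toList = [c]) (h : x ≠ "") :
    PySem.Str.startswith x p = true ↔ PySem.Str.pyGet? x 0 = some c := by
  have hx : x.toList ≠ [] := by
    intro h0; apply h; exact String.toList_inj.mp (by simp [h0])
  cases hlist : x.toList with
  | nil => exact absurd hlist hx
  | cons d ds =>
    simp [PySem.Str.startswith_eq, PySem.Chars.startswith_iff, hp, hlist,
      List.cons_prefix_cons]
    exact eq_comm

theorem fold_components (l : List String) (a b : Bool) (c1 c2 : Int)
    (h : ∀ x ∈ l, x ≠ "") :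
    (l.foldl (fun (st : Bool × Bool × Int × Int) x =>
      if PySem.Str.pyGet? x 0 = some 'Z' then (false, st.2.1, st.2.2.1 + 1, st.2.2.2)
      else if PySem.Str.pyGet? x 0 = some 'H' ∨ False then (st.1, false, st.2.2.1, st.2.2.2 + 1)
      else st) (a, b, c1, c2)).1
      = (a && l.all (fun x => !(PySem.Str.startswith x "Z")))
    ∧ (l.foldl (fun (st : Bool × Bool × Int × Int) x =>
      if PySem.Str.pyGet? x 0 = some 'Z' then (false, st.2.1, st.2.2.1 + 1, st.2.2.2)
      else if PySem.Str.pyGet? x 0 = some 'H' ∨ False then (st.1, false, st.2.2.1, st.2.2.2 + 1)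
      else st) (a, b, c1, c2)).2.1
      = (b && l.all (fun x => !(PySem.Str.startswith x "H"))) := by
  induction l generalizing a b c1 c2 with
  | nil => simp
  | cons x l ih =>
    have hx : x ≠ "" := h x (List.mem_cons_self)
    have h' : ∀ y ∈ l, y ≠ "" := fun y hy => h y (List.mem_cons_of_mem _ hy)
    have hz := startswith_single_iff x 'Z' "Z" rfl hx
    have hh := startswith_single_iff x 'H' "H" rfl hx
    simp only [List.foldl_cons, List.all_cons]
    by_cases hZ : PySem.Str.pyGet? x 0 = some 'Z'
    · have hzT : PySem.Str.startswith x "Z" = true := hz.mpr hZ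
      have hnH : PySem.Str.startswith x "H" = false := by
        rw [Bool.eq_false_iff, Ne, hh]
        intro hc; rw [hc] at hZ; exact absurd (Option.some.inj hZ) (by decide)
      rw [if_pos hZ]
      obtain ⟨i1, i2⟩ := ih false b (c1 + 1) c2 h'
      exact ⟨by rw [i1, hzT]; simp, by rw [i2, hnH]; simp⟩
    · have hnZ : PySem.Str.startswith x "Z" = false := by
        rw [Bool.eq_false_iff, Ne, hz]; exact hZ
      by_cases hH : PySem.Str.pyGet? x 0 = some 'H'
      · have hhT : PySem.Str.startswith x "H" = true := hh.mpr hH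
        rw [if_neg hZ, if_pos (show PySem.Str.pyGet? x 0 = some 'H' ∨ False from Or.inl hH)]
        obtain ⟨i1, i2⟩ := ih a false c1 (c2 + 1) h'
        exact ⟨by rw [i1, hnZ]; simp, by rw [i2, hhT]; simp⟩
      · have hnH : PySem.Str.startswith x "H" = false := by
          rw [Bool.eq_false_iff, Ne, hh]; exact hH
        rw [if_neg hZ, if_neg (show ¬(PySem.Str.pyGet? x 0 = some 'H' ∨ False) from fun hc => hc.elim hH False.elim)]
        obtain ⟨i1, i2⟩ := ih a b c1 c2 h'
        exact ⟨by rw [i1, hnZ]; simp, by rw [i2, hnH]; simp⟩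

-- ===== VERDICT (by name: the statement is the Claim_ definition above) =====
theorem christmasFated_spec : Claim_equal_christmasFated := by
  intro positions _ hpre
  unfold Spec_christmasFated christmasFated christmasFated_alt
  obtain ⟨h1, h2⟩ := fold_components positions true true 0 0 hpre
  simp only [h1, h2, Bool.true_and]
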